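-- pv_equiv track=rewrite | github.com/hgalstyan/advent-of-code-2022 | day22/part2.py | off_edge
-- ===== SOURCE A (Python) =====
-- dirs = [[0, 1], [1, 0], [0, -1], [-1, 0]]
--
-- SCALE = 50
--
-- def sign(x):
--     if x == 0:
--         return 0
--     return 1 if x > 0 else -1
--
-- def add(a, b):
--     a_copy = list(a)
--     for i in range(len(a)):
--         a_copy[i] += b[i]
--     return tuple(a_copy)
--
-- def along_edge_dir(edge):
--     start, end, _ = edge
--     return sign(end[0] - start[0]), sign(end[1] - start[1])
--
-- def off_edge(point, edge, direction):
--     start, end, edge_dir = edge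
--
--     if edge_dir != direction:
--         return None
--
--     if direction in [2, 3]:
--         start = add(start, dirs[direction])
--         end = add(end, dirs[direction])
--
--     idx = 0
--
--     drow, dcol = along_edge_dir(edge)
--     row, col = start[0], start[1]
--
--     for idx in range(SCALE):
--         if (row, col) == point:
--             return idx
--
--         row += drow
--         col += dcol
--
--     return None
-- ===== SOURCE B (Python) =====
-- SCALE = 50
--
-- def off_edge(point, edge, direction):
--     start, end, edge_dir = edge
--     if edge_dir != direction:
--         return None
--     drow = (end[0] > start[0]) - (end[0] < start[0])
--     dcol = (end[1] > start[1]) - (end[1] < start[1])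
--     row, col = start
--     if direction == 2:
--         col -= 1
--     elif direction == 3:
--         row -= 1
--     if drow != 0:
--         idx = (point[0] - row) * drow
--     elif dcol != 0:
--         idx = (point[1] - col) * dcol
--     else:
--         idx = 0
--     if 0 <= idx < SCALE and point == (row + idx * drow, col + idx * dcol):
--         return idx
--     return None
-- ===== Notes on version B (the rewrite author's own statement) =====
-- stated objective: faster
-- what changed: Replaces the 50-step walk along the edge by a closed-form index computation (idx derived from the varying coordinate, then a single range/membership check).
import Mathlib
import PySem

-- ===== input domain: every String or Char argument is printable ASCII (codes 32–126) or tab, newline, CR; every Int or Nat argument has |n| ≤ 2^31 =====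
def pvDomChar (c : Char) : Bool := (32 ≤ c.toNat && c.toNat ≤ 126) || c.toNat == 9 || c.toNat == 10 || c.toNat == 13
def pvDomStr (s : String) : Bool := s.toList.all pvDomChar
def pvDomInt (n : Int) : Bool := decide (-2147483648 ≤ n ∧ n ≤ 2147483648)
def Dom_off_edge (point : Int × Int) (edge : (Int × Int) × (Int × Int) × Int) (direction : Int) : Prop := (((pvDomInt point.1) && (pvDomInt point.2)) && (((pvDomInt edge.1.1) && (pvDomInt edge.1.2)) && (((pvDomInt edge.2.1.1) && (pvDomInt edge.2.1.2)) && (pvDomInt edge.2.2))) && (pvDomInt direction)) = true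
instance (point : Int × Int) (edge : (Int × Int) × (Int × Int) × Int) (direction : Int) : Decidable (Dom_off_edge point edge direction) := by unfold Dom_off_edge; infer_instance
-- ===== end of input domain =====

-- B replaces A's 50-step walk along the edge by a closed-form index computation.

-- ===== PORT A =====
-- dirs = [[0, 1], [1, 0], [0, -1], [-1, 0]]  (each inner list has length 2, modelled as a pair)
def pyDirs : List (Int × Int) := [(0, 1), (1, 0), (0, -1), (-1, 0)]

-- def sign(x)
def pySign (x : Int) : Int := if x = 0 then 0 else if x > 0 then 1 else -1

-- def add(a, b) (componentwise addition of the two length-2 tuples)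
def pyAdd (a b : Int × Int) : Int × Int := (a.1 + b.1, a.2 + b.2)

-- def along_edge_dir(edge)
def alongEdgeDir (edge : (Int × Int) × (Int × Int) × Int) : Int × Int :=
  (pySign (edge.2.1.1 - edge.1.1), pySign (edge.2.1.2 - edge.1.2))

-- the 'for idx in range(SCALE)' loop: early return on match, else step by (drow, dcol)
def offEdgeLoop (point : Int × Int) (drow dcol : Int) : List Int → Int → Int → Option Int
  | [], _, _ => none
  | i :: rest, row, col =>
      if (row, col) = point then some i else offEdgeLoop point drow dcol rest (row + drow) (col + dcol)

def off_edge (point : Int × Int) (edge : (Int × Int) × (Int × Int) × Int) (direction : Int) : Option Int :=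
  let start := edge.1
  let edge_dir := edge.2.2
  if edge_dir ≠ direction then none
  else
    -- 'if direction in [2, 3]: start = add(start, dirs[direction]); end = add(end, dirs[direction])'
    -- (dirs[direction] is in range here since direction ∈ {2,3}; getD default is unreachable)
    let start := if direction = 2 ∨ direction = 3 then
        pyAdd start ((PySem.List.pyGet? pyDirs direction).getD (0, 0))
      else start
    let dd := alongEdgeDir edge
    offEdgeLoop point dd.1 dd.2 (PySem.List.pyRange 0 50 1) start.1 start.2

-- ===== PORT B =====
def off_edge_alt (point : Int × Int) (edge : (Int × Int) × (Int × Int) × Int) (direction : Int) : Option Int :=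
  let start := edge.1
  let e := edge.2.1
  let edge_dir := edge.2.2
  if edge_dir ≠ direction then none
  else
    let drow : Int := (if e.1 > start.1 then 1 else 0) - (if e.1 < start.1 then 1 else 0)
    let dcol : Int := (if e.2 > start.2 then 1 else 0) - (if e.2 < start.2 then 1 else 0)
    let row : Int := if direction = 3 then start.1 - 1 else start.1
    let col : Int := if direction = 2 then start.2 - 1 else start.2
    let idx : Int :=
      if drow ≠ 0 then (point.1 - row) * drow
      else if dcol ≠ 0 then (point.2 - col) * dcol
      else 0
    if 0 ≤ idx ∧ idx < 50 ∧ point = (row + idx * drow, col + idx * dcol) then some idx else none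

-- ===== PRECONDITION & SPEC =====
def Spec_off_edge (point : Int × Int) (edge : (Int × Int) × (Int × Int) × Int) (direction : Int) (out : Option Int) : Prop := out = off_edge_alt point edge direction
instance (point : Int × Int) (edge : (Int × Int) × (Int × Int) × Int) (direction : Int) (out : Option Int) : Decidable (Spec_off_edge point edge direction out) := by unfold Spec_off_edge; infer_instance

-- ===== CLAIM (what is proved, stated in full; the proofs are below) =====
def Claim_equal_off_edge : Prop := ∀ (point : Int × Int) (edge : (Int × Int) × (Int × Int) × Int) (direction : Int), Dom_off_edge point edge direction → Spec_off_edge point edge direction (off_edge point edge direction)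

-- ===== LEMMAS AND PROOFS =====

-- degenerate edge: the loop never moves, so it matches at the first index or never
lemma offEdgeLoop_const (p : Int × Int) (l : List Int) (row col : Int) :
    offEdgeLoop p 0 0 l row col = if (row, col) = p then l.head? else none := by
  induction l with
  | nil => simp [offEdgeLoop]
  | cons i rest ih =>
      simp only [offEdgeLoop, add_zero, ih]
      split <;> simp

-- row strictly monotone (drow = ±1): the matching index, if any, is (p.1 - row) * drow
lemma offEdgeLoop_row (p : Int × Int) (drow dcol : Int) (hd : drow = 1 ∨ drow = -1) (n : Nat) :
    ∀ (i row col : Int),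
      offEdgeLoop p drow dcol (PySem.List.pyRange i (i + n) 1) row col =
        (if 0 ≤ (p.1 - row) * drow ∧ (p.1 - row) * drow < (n : Int) ∧ p.2 = col + (p.1 - row) * drow * dcol
         then some (i + (p.1 - row) * drow) else none) := by
  induction n with
  | zero =>
      intro i row col
      rw [PySem.List.pyRange_one_eq_nil (by omega)]
      simp only [offEdgeLoop]
      split
      · rename_i h; exfalso; push_cast at h; omega
      · rfl
  | succ n ih =>
      intro i row col
      rw [show (i + (n + 1 : Nat) : Int) = (i + 1) + n by push_cast; ring,
        PySem.List.pyRange_one_cons (by omega)]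
      simp only [offEdgeLoop, ih]
      by_cases hm : (row, col) = p
      · have h1 : p.1 = row := by rw [← hm]
        have h2 : p.2 = col := by rw [← hm]
        have hz : (p.1 - row) * drow = 0 := by rw [h1]; ring
        rw [if_pos hm, if_pos (by rw [hz]; constructor; omega; constructor; push_cast; omega; rw [h2]; ring)]
        rw [hz, add_zero]
      · rw [if_neg hm]
        have key : (p.1 - (row + drow)) * drow = (p.1 - row) * drow - 1 := by
          rcases hd with h | h <;> rw [h] <;> ring
        rw [key]
        by_cases hz : (p.1 - row) * drow = 0
        · -- idx = 0: p.1 = row (since drow = ±1) and p ≠ (row, col) forces p.2 ≠ col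
          have h1 : p.1 = row := by rcases hd with h | h <;> (rw [h] at hz; omega)
          have h2 : p.2 ≠ col := by
            intro h; exact hm (by rw [← h1, ← h])
          rw [if_neg (by rw [hz]; omega), if_neg (by rw [hz]; intro ⟨_, _, hc⟩; exact h2 (by omega))]
        · split <;> rename_i h
          · rw [if_pos ⟨by omega, by push_cast at h ⊢; omega, by rw [h.2.2]; ring⟩]
            congr 1; ring
          · rw [if_neg (by rintro ⟨ha, hb, hc⟩; exact h ⟨by omega, by push_cast at hb ⊢; omega, by rw [hc]; ring⟩)]

-- row constant, col strictly monotone (dcol = ±1)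
lemma offEdgeLoop_col (p : Int × Int) (dcol : Int) (hd : dcol = 1 ∨ dcol = -1) (n : Nat) :
    ∀ (i row col : Int),
      offEdgeLoop p 0 dcol (PySem.List.pyRange i (i + n) 1) row col =
        (if 0 ≤ (p.2 - col) * dcol ∧ (p.2 - col) * dcol < (n : Int) ∧ p.1 = row
         then some (i + (p.2 - col) * dcol) else none) := by
  induction n with
  | zero =>
      intro i row col
      rw [PySem.List.pyRange_one_eq_nil (by omega)]
      simp only [offEdgeLoop]
      split
      · rename_i h; exfalso; push_cast at h; omega
      · rfl
  | succ n ih =>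
      intro i row col
      rw [show (i + (n + 1 : Nat) : Int) = (i + 1) + n by push_cast; ring,
        PySem.List.pyRange_one_cons (by omega)]
      simp only [offEdgeLoop, add_zero, ih]
      by_cases hm : (row, col) = p
      · have h1 : p.1 = row := by rw [← hm]
        have h2 : p.2 = col := by rw [← hm]
        have hz : (p.2 - col) * dcol = 0 := by rw [h2]; ring
        rw [if_pos hm, if_pos (by rw [hz]; constructor; omega; constructor; push_cast; omega; exact h1)]
        rw [hz, add_zero]
      · rw [if_neg hm]
        have key : (p.2 - (col + dcol)) * dcol = (p.2 - col) * dcol - 1 := by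
          rcases hd with h | h <;> rw [h] <;> ring
        rw [key]
        by_cases hz : (p.2 - col) * dcol = 0
        · have h2 : p.2 = col := by rcases hd with h | h <;> (rw [h] at hz; omega)
          have h1 : p.1 ≠ row := by
            intro h; exact hm (by rw [← h2, ← h])
          rw [if_neg (by rw [hz]; omega), if_neg (by rw [hz]; intro ⟨_, _, hc⟩; exact h1 hc)]
        · split <;> rename_i h
          · rw [if_pos ⟨by omega, by push_cast at h ⊢; omega, h.2.2⟩]
            congr 1; ring
          · rw [if_neg (by rintro ⟨ha, hb, hc⟩; exact h ⟨by omega, by push_cast at hb ⊢; omega, hc⟩)]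

lemma pySign_cmp (a b : Int) :
    pySign (a - b) = (if a > b then (1:Int) else 0) - (if a < b then 1 else 0) := by
  unfold pySign; split_ifs <;> omega

lemma opt_if_congr {c d : Prop} [Decidable c] [Decidable d] (h : c ↔ d) {x y : Int} (hxy : x = y) :
    (if c then some x else none) = (if d then some y else none) := by
  by_cases hc : c
  · rw [if_pos hc, if_pos (h.mp hc), hxy]
  · rw [if_neg hc, if_neg (fun hd => hc (h.mpr hd))]

-- ===== VERDICT (by name: the statement is the Claim_ definition above) =====
theorem off_edge_spec : Claim_equal_off_edge := by
  intro p edge direction _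
  obtain ⟨⟨s1, s2⟩, ⟨e1, e2⟩, ed⟩ := edge
  unfold Spec_off_edge off_edge off_edge_alt
  by_cases hg : ed ≠ direction
  · simp [hg]
  rw [ne_eq, not_not] at hg
  have hst : (if direction = 2 ∨ direction = 3 then
      pyAdd (s1, s2) ((PySem.List.pyGet? pyDirs direction).getD (0, 0)) else (s1, s2))
      = ((if direction = 3 then s1 - 1 else s1), (if direction = 2 then s2 - 1 else s2)) := by
    by_cases h2 : direction = 2
    · simp [h2, pyAdd, pyDirs, PySem.List.pyGet?, PySem.List.pyIdx?]; omega
    · by_cases h3 : direction = 3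
      · simp [h3, pyAdd, pyDirs, PySem.List.pyGet?, PySem.List.pyIdx?]; omega
      · simp [h2, h3]
  simp only [hg, ne_eq, not_true_eq_false, if_false, hst, alongEdgeDir]
  generalize (if direction = 3 then s1 - 1 else s1) = row
  generalize (if direction = 2 then s2 - 1 else s2) = col
  rw [pySign_cmp e1 s1, pySign_cmp e2 s2]
  rw [show PySem.List.pyRange 0 50 = PySem.List.pyRange ((0:Int)) ((0:Int) + ((50:Nat):Int)) from by norm_num]
  rcases lt_trichotomy e1 s1 with h1 | h1 | h1
  · -- drow = -1
    have hb : ((if e1 > s1 then (1:Int) else 0) - (if e1 < s1 then 1 else 0)) = -1 := by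
      rw [if_neg (by omega), if_pos h1]; norm_num
    rw [hb]
    generalize ((if e2 > s2 then (1:Int) else 0) - (if e2 < s2 then 1 else 0)) = dcol
    rw [offEdgeLoop_row p (-1) dcol (Or.inr rfl) 50 0 row col,
      if_pos (show ¬((-1:Int) = 0) by norm_num)]
    apply opt_if_congr
    · simp only [Prod.ext_iff]
      constructor
      · rintro ⟨a, b, c⟩; exact ⟨a, by push_cast at b ⊢; omega, by omega, c⟩
      · rintro ⟨a, b, c, d⟩; exact ⟨a, by push_cast at b ⊢; omega, d⟩
    · omega
  · -- drow = 0
    have hb : ((if e1 > s1 then (1:Int) else 0) - (if e1 < s1 then 1 else 0)) = 0 := by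
      rw [if_neg (by omega), if_neg (by omega)]; norm_num
    rw [hb]
    rcases lt_trichotomy e2 s2 with h2 | h2 | h2
    · have hc : ((if e2 > s2 then (1:Int) else 0) - (if e2 < s2 then 1 else 0)) = -1 := by
        rw [if_neg (by omega), if_pos h2]; norm_num
      rw [hc, offEdgeLoop_col p (-1) (Or.inr rfl) 50 0 row col,
        if_neg (show ¬¬((0:Int) = 0) by norm_num), if_pos (show ¬((-1:Int) = 0) by norm_num)]
      apply opt_if_congr
      · simp only [Prod.ext_iff]
        constructor
        · rintro ⟨a, b, c⟩; exact ⟨a, by push_cast at b ⊢; omega, by omega, by omega⟩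
        · rintro ⟨a, b, c, d⟩; exact ⟨a, by push_cast at b ⊢; omega, by omega⟩
      · omega
    · have hc : ((if e2 > s2 then (1:Int) else 0) - (if e2 < s2 then 1 else 0)) = 0 := by
        rw [if_neg (by omega), if_neg (by omega)]; norm_num
      rw [hc, offEdgeLoop_const,
        PySem.List.pyRange_one_cons (show (0:Int) < 0 + ((50:Nat):Int) by norm_num),
        List.head?_cons,
        if_neg (show ¬¬((0:Int) = 0) by norm_num), if_neg (show ¬¬((0:Int) = 0) by norm_num)]
      apply opt_if_congr
      · simp only [Prod.ext_iff]; omega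
      · rfl
    · have hc : ((if e2 > s2 then (1:Int) else 0) - (if e2 < s2 then 1 else 0)) = 1 := by
        rw [if_pos h2, if_neg (by omega)]; norm_num
      rw [hc, offEdgeLoop_col p 1 (Or.inl rfl) 50 0 row col,
        if_neg (show ¬¬((0:Int) = 0) by norm_num), if_pos (show ¬((1:Int) = 0) by norm_num)]
      apply opt_if_congr
      · simp only [Prod.ext_iff]
        constructor
        · rintro ⟨a, b, c⟩; exact ⟨a, by push_cast at b ⊢; omega, by omega, by omega⟩
        · rintro ⟨a, b, c, d⟩; exact ⟨a, by push_cast at b ⊢; omega, by omega⟩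
      · omega
  · -- drow = 1
    have hb : ((if e1 > s1 then (1:Int) else 0) - (if e1 < s1 then 1 else 0)) = 1 := by
      rw [if_pos h1, if_neg (by omega)]; norm_num
    rw [hb]
    generalize ((if e2 > s2 then (1:Int) else 0) - (if e2 < s2 then 1 else 0)) = dcol
    rw [offEdgeLoop_row p 1 dcol (Or.inl rfl) 50 0 row col,
      if_pos (show ¬((1:Int) = 0) by norm_num)]
    apply opt_if_congr
    · simp only [Prod.ext_iff]
      constructor
      · rintro ⟨a, b, c⟩; exact ⟨a, by push_cast at b ⊢; omega, by omega, c⟩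
      · rintro ⟨a, b, c, d⟩; exact ⟨a, by push_cast at b ⊢; omega, d⟩
    · omega
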